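-- pv_equiv track=rewrite | github.com/steveya/trellis | trellis/agent/cycle_surface.py | _stage_statuses
-- ===== SOURCE A (Python) =====
-- from collections.abc import Iterable, Mapping
-- from typing import Any
--
-- _STAGE_ORDER = (
--     "quant",
--     "validation_bundle",
--     "reference_oracle",
--     "critic",
--     "arbiter",
--     "model_validator",
-- )
--
-- def _stage_statuses(report: Mapping[str, Any]) -> dict[str, str]:
--     statuses = report.get("stage_statuses")
--     if not isinstance(statuses, Mapping):
--         return {}
--     normalized = {
--         str(stage).strip(): str(status).strip().lower()
--         for stage, status in statuses.items()
--         if str(stage).strip()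
--     }
--     return {
--         stage: normalized[stage]
--         for stage in sorted(normalized, key=_stage_sort_key)
--     }
--
-- def _stage_sort_key(stage: str) -> tuple[int, str]:
--     try:
--         index = _STAGE_ORDER.index(stage)
--     except ValueError:
--         index = 999
--     return index, stage
-- ===== SOURCE B (Python) =====
-- from collections.abc import Mapping
-- from typing import Any
--
-- _STAGE_ORDER = (
--     "quant",
--     "validation_bundle",
--     "reference_oracle",
--     "critic",
--     "arbiter",
--     "model_validator",
-- )
--
-- def _stage_statuses(report: Mapping[str, Any]) -> dict[str, str]:
--     statuses = report.get("stage_statuses")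
--     if not isinstance(statuses, Mapping):
--         return {}
--     normalized = {
--         str(stage).strip(): str(status).strip().lower()
--         for stage, status in statuses.items()
--         if str(stage).strip()
--     }
--     out = {stage: normalized[stage] for stage in _STAGE_ORDER if stage in normalized}
--     for stage in sorted(k for k in normalized if k not in _STAGE_ORDER):
--         out[stage] = normalized[stage]
--     return out
-- ===== Notes on version B (the rewrite author's own statement) =====
-- stated objective: alternative
-- what changed: Replaces the single sorted(..., key=(index,stage)) comparison sort of all keys by a fixed-order scan over the canonical _STAGE_ORDER list followed by a plain alphabetical sort of only the unknown keys.
import Mathlib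
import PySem

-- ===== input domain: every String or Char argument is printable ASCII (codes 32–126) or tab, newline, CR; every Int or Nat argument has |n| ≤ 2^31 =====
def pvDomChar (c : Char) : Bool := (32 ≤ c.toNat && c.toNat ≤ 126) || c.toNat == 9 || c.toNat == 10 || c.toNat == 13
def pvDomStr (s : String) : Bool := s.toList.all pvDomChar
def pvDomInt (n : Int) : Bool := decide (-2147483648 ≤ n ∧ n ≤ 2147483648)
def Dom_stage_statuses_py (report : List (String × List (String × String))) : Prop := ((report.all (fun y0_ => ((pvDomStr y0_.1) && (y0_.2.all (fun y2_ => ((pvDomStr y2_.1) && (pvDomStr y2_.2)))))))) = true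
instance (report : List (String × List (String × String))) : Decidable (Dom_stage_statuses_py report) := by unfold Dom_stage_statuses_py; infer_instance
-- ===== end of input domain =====

-- B keeps A's normalization pass but replaces the single sorted(..., key=(index,stage)) pass by a
-- scan over the canonical _STAGE_ORDER list followed by an alphabetical sort of only the unknown keys
-- (objective: alternative decomposition, same observable result).

-- ===== PORT A =====
def pvStageOrder : List String :=
  ["quant", "validation_bundle", "reference_oracle", "critic", "arbiter", "model_validator"]

-- the shared dict comprehension 'normalized' (dict semantics: overwrite keeps position)
def pvNormalized (statuses : List (String × String)) : PySem.Dict String String :=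
  (PySem.Dict.ofList statuses).items.foldl
    (fun d kv =>
      if PySem.Str.strip kv.1 ≠ "" then
        d.insert (PySem.Str.strip kv.1) (PySem.Str.lower (PySem.Str.strip kv.2))
      else d)
    PySem.Dict.empty

-- _stage_sort_key: index in _STAGE_ORDER (999 on ValueError), paired lexicographically with the stage
def pvIdx (stage : String) : Int :=
  match PySem.List.index? pvStageOrder stage with
  | some i => (i : Int)
  | none => 999

def pvSortKey (stage : String) : Int ×ₗ String := toLex (pvIdx stage, stage)

def stage_statuses_py (report : List (String × List (String × String))) : List (String × String) :=
  match (PySem.Dict.ofList report).get? "stage_statuses" with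
  | none => []
  | some statuses =>
    let normalized := pvNormalized statuses
    (PySem.List.sorted normalized.keys pvSortKey).map (fun s => (s, normalized.getD s ""))

-- ===== PORT B =====
def stage_statuses_py_alt (report : List (String × List (String × String))) : List (String × String) :=
  match (PySem.Dict.ofList report).get? "stage_statuses" with
  | none => []
  | some statuses =>
    let normalized := pvNormalized statuses
    -- canonical stages that are present, in _STAGE_ORDER order
    let canon := (pvStageOrder.filter (fun s => normalized.contains s)).map
      (fun s => (s, normalized.getD s ""))
    -- remaining keys, alphabetically
    let rest := (PySem.List.sorted (normalized.keys.filter (fun s => !pvStageOrder.contains s))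
        (fun s => s)).map (fun s => (s, normalized.getD s ""))
    canon ++ rest

-- ===== PRECONDITION & SPEC =====
def Spec_stage_statuses_py (report : List (String × List (String × String))) (out : List (String × String)) : Prop := out = stage_statuses_py_alt report
instance (report : List (String × List (String × String))) (out : List (String × String)) : Decidable (Spec_stage_statuses_py report out) := by unfold Spec_stage_statuses_py; infer_instance

-- ===== CLAIM (what is proved, stated in full; the proofs are below) =====
def Claim_equal_stage_statuses_py : Prop := ∀ (report : List (String × List (String × String))), Dom_stage_statuses_py report → Spec_stage_statuses_py report (stage_statuses_py report)

-- ===== LEMMAS AND PROOFS =====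

theorem pvIdx_of_not_mem {s : String} (h : s ∉ pvStageOrder) : pvIdx s = 999 := by
  unfold pvIdx
  rw [(PySem.List.index?_eq_none_iff pvStageOrder s).mpr h]

theorem pvIdx_lt_of_mem {s : String} (h : s ∈ pvStageOrder) : pvIdx s < 999 := by
  unfold pvIdx
  rcases ho : PySem.List.index? pvStageOrder s with _ | k
  · exact absurd ((PySem.List.index?_eq_none_iff pvStageOrder s).mp ho) (by simpa using h)
  · obtain ⟨hk, -, -⟩ := PySem.List.getElem_of_index?_eq_some ho
    show (k : Int) < 999
    simp only [pvStageOrder, List.length] at hk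
    omega

theorem pvKey_lt_of_idx_lt {a b : String} (h : pvIdx a < pvIdx b) : pvSortKey a < pvSortKey b := by
  unfold pvSortKey
  rw [Prod.Lex.lt_iff]
  exact Or.inl h

theorem pvKey_lt_of_str_lt {a b : String} (hi : pvIdx a = pvIdx b) (h : a < b) :
    pvSortKey a < pvSortKey b := by
  unfold pvSortKey
  rw [Prod.Lex.lt_iff]
  exact Or.inr ⟨hi, h⟩

theorem pvStageOrder_pairwise_idx : List.Pairwise (fun a b => pvIdx a < pvIdx b) pvStageOrder := by
  decide

theorem pvNormalized_keys_nodup_aux (l : List (String × String))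
    (d : PySem.Dict String String) (hd : d.keys.Nodup) :
    (l.foldl (fun d kv =>
      if PySem.Str.strip kv.1 ≠ "" then
        d.insert (PySem.Str.strip kv.1) (PySem.Str.lower (PySem.Str.strip kv.2))
      else d) d).keys.Nodup := by
  induction l generalizing d with
  | nil => simpa using hd
  | cons kv t ih =>
    simp only [List.foldl_cons]
    split_ifs with h
    · exact ih _ (PySem.Dict.nodup_keys_insert d _ _ hd)
    · exact ih _ hd

theorem pvNormalized_keys_nodup (statuses : List (String × String)) :
    (pvNormalized statuses).keys.Nodup :=
  pvNormalized_keys_nodup_aux _ _ PySem.Dict.nodup_keys_empty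

-- the heart: A's single composite-key sort equals B's canonical scan ++ alphabetical sort of the rest
theorem sorted_key_split (d : PySem.Dict String String) (hn : d.keys.Nodup) :
    PySem.List.sorted d.keys pvSortKey =
      pvStageOrder.filter (fun s => d.contains s) ++
        PySem.List.sorted (d.keys.filter (fun s => !pvStageOrder.contains s)) (fun s => s) := by
  apply PySem.List.sorted_eq_of_perm_of_pairwise_lt
  · -- permutation
    have h1 : (pvStageOrder.filter (fun s => d.contains s)).Perm
        (d.keys.filter (fun s => pvStageOrder.contains s)) := by
      apply List.perm_of_nodup_nodup_toFinset_eq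
      · exact (by decide : pvStageOrder.Nodup).filter _
      · exact hn.filter _
      · ext x
        simp only [List.mem_toFinset, List.mem_filter, List.contains_iff_mem,
          PySem.Dict.contains_iff_mem_keys]
        tauto
    have h2 : (PySem.List.sorted (d.keys.filter (fun s => !pvStageOrder.contains s))
        (fun s => s)).Perm (d.keys.filter (fun s => !pvStageOrder.contains s)) :=
      PySem.List.sorted_perm _ _ _
    exact (h1.append h2).trans (List.filter_append_perm _ d.keys)
  · -- strictly increasing under the composite key
    rw [List.pairwise_append]
    refine ⟨?_, ?_, ?_⟩
    · exact (pvStageOrder_pairwise_idx.filter _).imp pvKey_lt_of_idx_lt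
    · -- rest: alphabetical and nodup, hence strictly increasing strings, all with index 999
      have hperm := PySem.List.sorted_perm (d.keys.filter (fun s => !pvStageOrder.contains s))
        (fun s : String => s) false
      have hnd : (PySem.List.sorted (d.keys.filter (fun s => !pvStageOrder.contains s))
          (fun s : String => s)).Nodup := hperm.nodup_iff.mpr (hn.filter _)
      have hle := PySem.List.sorted_pairwise (d.keys.filter (fun s => !pvStageOrder.contains s))
        (fun s : String => s)
      have hmem : ∀ x ∈ PySem.List.sorted (d.keys.filter (fun s => !pvStageOrder.contains s))
          (fun s : String => s), x ∉ pvStageOrder := by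
        intro x hx
        have := hperm.mem_iff.mp hx
        simp only [List.mem_filter, Bool.not_eq_eq_eq_not, Bool.not_true] at this
        simpa using this.2
      have := hle.and hnd
      refine this.imp_of_mem ?_
      intro a b ha hb ⟨hab, hne⟩
      exact pvKey_lt_of_str_lt
        (by rw [pvIdx_of_not_mem (hmem a ha), pvIdx_of_not_mem (hmem b hb)])
        (lt_of_le_of_ne hab hne)
    · -- canonical stages sort before unknown ones
      intro a ha b hb
      have haS : a ∈ pvStageOrder := (List.mem_filter.mp ha).1
      have hbS : b ∉ pvStageOrder := by
        have := (PySem.List.sorted_perm (d.keys.filter (fun s => !pvStageOrder.contains s))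
          (fun s : String => s) false).mem_iff.mp hb
        simp only [List.mem_filter, Bool.not_eq_eq_eq_not, Bool.not_true] at this
        simpa using this.2
      exact pvKey_lt_of_idx_lt (by rw [pvIdx_of_not_mem hbS]; exact pvIdx_lt_of_mem haS)

-- ===== VERDICT (by name: the statement is the Claim_ definition above) =====
theorem stage_statuses_py_spec : Claim_equal_stage_statuses_py := by
  intro report _
  unfold Spec_stage_statuses_py stage_statuses_py stage_statuses_py_alt
  rcases (PySem.Dict.ofList report).get? "stage_statuses" with _ | statuses
  · rfl
  · simp only []
    rw [sorted_key_split (pvNormalized statuses) (pvNormalized_keys_nodup statuses),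
      List.map_append]
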